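-- pv_equiv track=rewrite | github.com/cipher813/alpha-engine-research | graph/reducers.py | merge_typed_dicts
-- ===== SOURCE A (Python) =====
-- def merge_typed_dicts(left: dict | None, right: dict | None) -> dict:
--     """
--     Merge two ``dict[str, T]`` values from parallel branches.
--
--     Last-write-wins on overlapping keys. Returns canonical (sorted) key
--     order so downstream consumers iterating ``.items()`` get a deterministic
--     sequence regardless of which branch's update arrived first.
--     """
--     if left is None:
--         merged = dict(right or {})
--     elif right is None:
--         merged = dict(left)
--     else:
--         merged = {**left, **right}
--     return {k: merged[k] for k in sorted(merged)}
-- ===== SOURCE B (Python) =====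
-- def merge_typed_dicts(left: dict | None, right: dict | None) -> dict:
--     """Two-pointer merge: sort each side's items by key, then linearly merge
--     the two sorted streams, the right stream winning on equal keys."""
--     a = sorted((left or {}).items(), key=lambda kv: kv[0])
--     b = sorted((right or {}).items(), key=lambda kv: kv[0])
--     out = []
--     i = j = 0
--     while i < len(a) and j < len(b):
--         if a[i][0] < b[j][0]:
--             out.append(a[i])
--             i += 1
--         elif b[j][0] < a[i][0]:
--             out.append(b[j])
--             j += 1
--         else:
--             out.append(b[j])
--             i += 1
--             j += 1
--     return dict(out + a[i:] + b[j:])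
-- ===== Notes on version B (the rewrite author's own statement) =====
-- stated objective: alternative
-- what changed: B never merges into one dict and never sorts a merged collection: it sorts each input's items separately and produces the result by a linear two-pointer merge of the two sorted streams, the right stream winning on equal keys.
import Mathlib
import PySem

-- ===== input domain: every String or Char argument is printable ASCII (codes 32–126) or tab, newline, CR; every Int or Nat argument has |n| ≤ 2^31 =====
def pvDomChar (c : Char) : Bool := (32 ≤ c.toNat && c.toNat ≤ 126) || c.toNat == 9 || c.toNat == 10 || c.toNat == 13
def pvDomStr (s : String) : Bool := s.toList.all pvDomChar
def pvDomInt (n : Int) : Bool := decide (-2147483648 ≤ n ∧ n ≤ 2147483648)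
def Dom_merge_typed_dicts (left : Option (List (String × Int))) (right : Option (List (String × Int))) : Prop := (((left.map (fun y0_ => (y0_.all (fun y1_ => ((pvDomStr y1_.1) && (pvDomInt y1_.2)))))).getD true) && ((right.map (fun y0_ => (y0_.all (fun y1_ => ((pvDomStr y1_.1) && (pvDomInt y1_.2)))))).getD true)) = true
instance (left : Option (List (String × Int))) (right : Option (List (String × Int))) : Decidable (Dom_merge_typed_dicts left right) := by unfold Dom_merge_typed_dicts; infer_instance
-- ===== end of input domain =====

-- B is a different algorithm: it sorts each input's items separately and produces the result by a
-- linear two-pointer merge of the two sorted streams (right wins on equal keys), never building a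
-- merged dict and never sorting a merged collection (objective: alternative).

-- ===== PORT A =====
-- merged[k] inside the final comprehension is ported as getD k 0: k ranges over merged.keys,
-- so the lookup never misses and the default 0 is never returned (exact).
def merge_typed_dicts (left : Option (List (String × Int))) (right : Option (List (String × Int))) : List (String × Int) :=
  let merged : PySem.Dict String Int :=
    match left with
    | none => PySem.Dict.ofList (right.getD [])          -- dict(right or {})
    | some l =>
      match right with
      | none => PySem.Dict.ofList l                      -- dict(left)
      | some r => (PySem.Dict.ofList l).update r         -- {**left, **right}
  (PySem.List.sorted merged.keys (fun k => k) false).map (fun k => (k, merged.getD k 0))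

-- ===== PORT B =====
-- the while loop over indices i, j is ported as the obvious structural recursion on the two
-- remaining suffixes a[i:], b[j:]; 'out.append' becomes consing onto the recursive result, and the
-- final 'out + a[i:] + b[j:]' is the base cases returning the leftover suffix.
def pvMergeLoop : List (String × Int) → List (String × Int) → List (String × Int)
  | [], b => b
  | a, [] => a
  | pa :: as, pb :: bs =>
    if pa.1 < pb.1 then pa :: pvMergeLoop as (pb :: bs)
    else if pb.1 < pa.1 then pb :: pvMergeLoop (pa :: as) bs
    else pb :: pvMergeLoop as bs

def merge_typed_dicts_alt (left : Option (List (String × Int))) (right : Option (List (String × Int))) : List (String × Int) :=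
  let a := PySem.List.sorted (PySem.Dict.ofList (left.getD [])).items (fun kv => kv.1) false
  let b := PySem.List.sorted (PySem.Dict.ofList (right.getD [])).items (fun kv => kv.1) false
  (PySem.Dict.ofList (pvMergeLoop a b)).items            -- dict(out + a[i:] + b[j:])

-- ===== PRECONDITION & SPEC =====
def Spec_merge_typed_dicts (left : Option (List (String × Int))) (right : Option (List (String × Int))) (out : List (String × Int)) : Prop := out = merge_typed_dicts_alt left right
instance (left : Option (List (String × Int))) (right : Option (List (String × Int))) (out : List (String × Int)) : Decidable (Spec_merge_typed_dicts left right out) := by unfold Spec_merge_typed_dicts; infer_instance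

-- ===== CLAIM (what is proved, stated in full; the proofs are below) =====
def Claim_equal_merge_typed_dicts : Prop := ∀ (left : Option (List (String × Int))) (right : Option (List (String × Int))), Dom_merge_typed_dicts left right → Spec_merge_typed_dicts left right (merge_typed_dicts left right)

-- ===== LEMMAS AND PROOFS =====

-- dict.update r, looked up at k: the last write from r wins, else the base dict answers.
theorem get?_update_split {κ ν : Type} [BEq κ] [LawfulBEq κ] [DecidableEq κ]
    (d : PySem.Dict κ ν) (r : List (κ × ν)) (k : κ) :
    (d.update r).get? k =
      match (PySem.Dict.ofList r).get? k with
      | some v => some v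
      | none => d.get? k := by
  induction r generalizing d with
  | nil => simp [PySem.Dict.update, PySem.Dict.ofList, PySem.Dict.get?_empty]
  | cons p rest ih =>
    have hbase : (PySem.Dict.ofList (p :: rest)).get? k =
        match (PySem.Dict.ofList rest).get? k with
        | some v => some v
        | none => (PySem.Dict.empty.insert p.1 p.2).get? k := by
      have := ih (d := PySem.Dict.empty.insert p.1 p.2)
      simpa [PySem.Dict.ofList, PySem.Dict.update] using this
    have hl : (d.update (p :: rest)).get? k =
        match (PySem.Dict.ofList rest).get? k with
        | some v => some v
        | none => (d.insert p.1 p.2).get? k := by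
      have := ih (d := d.insert p.1 p.2)
      simpa [PySem.Dict.update] using this
    rw [hl, hbase]
    cases (PySem.Dict.ofList rest).get? k with
    | some v => rfl
    | none =>
      rw [PySem.Dict.get?_insert, PySem.Dict.get?_insert, PySem.Dict.get?_empty]
      by_cases h : k = p.1 <;> simp [h]

theorem nodup_keys_ofList' {κ ν : Type} [BEq κ] [LawfulBEq κ]
    (r : List (κ × ν)) : (PySem.Dict.ofList r).keys.Nodup :=
  PySem.Dict.nodup_keys_update _ _ PySem.Dict.nodup_keys_empty

-- membership in pvMergeLoop of two key-strictly-sorted lists: right wins on common keys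
theorem pvMergeLoop_mem (a b : List (String × Int))
    (ha : a.Pairwise (fun p q => p.1 < q.1)) (hb : b.Pairwise (fun p q => p.1 < q.1)) (p : String × Int) :
    p ∈ pvMergeLoop a b ↔ p ∈ b ∨ (p ∈ a ∧ p.1 ∉ b.map Prod.fst) := by
  fun_induction pvMergeLoop a b with
  | case1 b => simp
  | case2 a h => simp
  | case3 pa as pb bs hlt ih =>
    rw [List.pairwise_cons] at ha
    have hbkeys : ∀ q ∈ pb :: bs, pb.1 ≤ q.1 := by
      intro q hq
      rcases List.mem_cons.mp hq with h | h
      · exact le_of_eq (h ▸ rfl)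
      · exact le_of_lt ((List.pairwise_cons.mp hb).1 q h)
    rw [List.mem_cons, ih ha.2 hb]
    constructor
    · rintro (rfl | hB | ⟨hA, hnb⟩)
      · refine Or.inr ⟨List.mem_cons_self, ?_⟩
        intro hmem
        rcases List.mem_map.mp hmem with ⟨q, hq, hq1⟩
        exact absurd (hq1 ▸ hbkeys q hq) (not_le.mpr hlt)
      · exact Or.inl hB
      · exact Or.inr ⟨List.mem_cons_of_mem _ hA, hnb⟩
    · rintro (hB | ⟨hA, hnb⟩)
      · exact Or.inr (Or.inl hB)
      · rcases List.mem_cons.mp hA with rfl | hA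
        · exact Or.inl rfl
        · exact Or.inr (Or.inr ⟨hA, hnb⟩)
  | case4 pa as pb bs hnlt hlt ih =>
    have hakeys : ∀ q ∈ pa :: as, pa.1 ≤ q.1 := by
      intro q hq
      rcases List.mem_cons.mp hq with h | h
      · exact le_of_eq (h ▸ rfl)
      · exact le_of_lt ((List.pairwise_cons.mp ha).1 q h)
    rw [List.pairwise_cons] at hb
    rw [List.mem_cons, ih ha hb.2]
    constructor
    · rintro (rfl | hB | ⟨hA, hnb⟩)
      · exact Or.inl List.mem_cons_self
      · exact Or.inl (List.mem_cons_of_mem _ hB)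
      · refine Or.inr ⟨hA, ?_⟩
        intro hmem
        rcases List.mem_map.mp hmem with ⟨q, hq, hq1⟩
        rcases List.mem_cons.mp hq with rfl | hq'
        · exact absurd hq1 (ne_of_lt (lt_of_lt_of_le hlt (hakeys p hA)))
        · exact hnb (List.mem_map.mpr ⟨q, hq', hq1⟩)
    · rintro (hB | ⟨hA, hnb⟩)
      · rcases List.mem_cons.mp hB with rfl | hB'
        · exact Or.inl rfl
        · exact Or.inr (Or.inl hB')
      · refine Or.inr (Or.inr ⟨hA, ?_⟩)
        intro hmem
        exact hnb (List.map_subset _ (List.subset_cons_self _ _) hmem)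
  | case5 pa as pb bs hnlt hnlt' ih =>
    have heq : pa.1 = pb.1 := le_antisymm (not_lt.mp hnlt') (not_lt.mp hnlt)
    rw [List.pairwise_cons] at ha
    rw [List.pairwise_cons] at hb
    rw [List.mem_cons, ih ha.2 hb.2]
    constructor
    · rintro (rfl | hB | ⟨hA, hnb⟩)
      · exact Or.inl List.mem_cons_self
      · exact Or.inl (List.mem_cons_of_mem _ hB)
      · refine Or.inr ⟨List.mem_cons_of_mem _ hA, ?_⟩
        intro hmem
        rcases List.mem_map.mp hmem with ⟨q, hq, hq1⟩
        rcases List.mem_cons.mp hq with rfl | hq'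
        · exact absurd (hq1 ▸ heq ▸ ha.1 p hA) (lt_irrefl _)
        · exact hnb (List.mem_map.mpr ⟨q, hq', hq1⟩)
    · rintro (hB | ⟨hA, hnb⟩)
      · rcases List.mem_cons.mp hB with rfl | hB'
        · exact Or.inl rfl
        · exact Or.inr (Or.inl hB')
      · rcases List.mem_cons.mp hA with rfl | hA'
        · exact absurd (List.mem_map.mpr ⟨pb, List.mem_cons_self, heq.symm⟩) hnb
        · refine Or.inr (Or.inr ⟨hA', ?_⟩)
          intro hmem
          exact hnb (List.map_subset _ (List.subset_cons_self _ _) hmem)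

-- the merge of two key-strictly-sorted lists is key-strictly-sorted
theorem pvMergeLoop_subset (a b : List (String × Int)) (p : String × Int)
    (hp : p ∈ pvMergeLoop a b) : p ∈ a ∨ p ∈ b := by
  fun_induction pvMergeLoop a b with
  | case1 b => exact Or.inr hp
  | case2 a h => exact Or.inl hp
  | case3 pa as pb bs hlt ih =>
    rcases List.mem_cons.mp hp with rfl | hp'
    · exact Or.inl List.mem_cons_self
    · rcases ih hp' with h | h
      · exact Or.inl (List.mem_cons_of_mem _ h)
      · exact Or.inr h
  | case4 pa as pb bs hnlt hlt ih =>
    rcases List.mem_cons.mp hp with rfl | hp'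
    · exact Or.inr List.mem_cons_self
    · rcases ih hp' with h | h
      · exact Or.inl h
      · exact Or.inr (List.mem_cons_of_mem _ h)
  | case5 pa as pb bs hnlt hnlt' ih =>
    rcases List.mem_cons.mp hp with rfl | hp'
    · exact Or.inr List.mem_cons_self
    · rcases ih hp' with h | h
      · exact Or.inl (List.mem_cons_of_mem _ h)
      · exact Or.inr (List.mem_cons_of_mem _ h)

theorem pvMergeLoop_pairwise (a b : List (String × Int))
    (ha : a.Pairwise (fun p q => p.1 < q.1)) (hb : b.Pairwise (fun p q => p.1 < q.1)) :
    (pvMergeLoop a b).Pairwise (fun p q => p.1 < q.1) := by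
  fun_induction pvMergeLoop a b with
  | case1 b => exact hb
  | case2 a h => exact ha
  | case3 pa as pb bs hlt ih =>
    rw [List.pairwise_cons] at ha
    rw [List.pairwise_cons]
    refine ⟨?_, ih ha.2 hb⟩
    intro q hq
    rcases pvMergeLoop_subset _ _ _ hq with h | h
    · exact ha.1 q h
    · rcases List.mem_cons.mp h with rfl | h'
      · exact hlt
      · exact lt_trans hlt ((List.pairwise_cons.mp hb).1 q h')
  | case4 pa as pb bs hnlt hlt ih =>
    rw [List.pairwise_cons] at hb
    rw [List.pairwise_cons]
    refine ⟨?_, ih ha hb.2⟩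
    intro q hq
    rcases pvMergeLoop_subset _ _ _ hq with h | h
    · rcases List.mem_cons.mp h with rfl | h'
      · exact hlt
      · exact lt_trans hlt ((List.pairwise_cons.mp ha).1 q h')
    · exact hb.1 q h
  | case5 pa as pb bs hnlt hnlt' ih =>
    have heq : pa.1 = pb.1 := le_antisymm (not_lt.mp hnlt') (not_lt.mp hnlt)
    rw [List.pairwise_cons] at ha
    rw [List.pairwise_cons] at hb
    rw [List.pairwise_cons]
    refine ⟨?_, ih ha.2 hb.2⟩
    intro q hq
    rcases pvMergeLoop_subset _ _ _ hq with h | h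
    · exact heq ▸ ha.1 q h
    · exact hb.1 q h

-- the sorted items of a dict are key-strictly-sorted
theorem sorted_items_pairwise (d : PySem.Dict String Int) (hnd : d.keys.Nodup) :
    (PySem.List.sorted d.items (fun kv => kv.1) false).Pairwise (fun p q => p.1 < q.1) := by
  have hle := PySem.List.sorted_pairwise d.items (fun kv => kv.1)
  have hperm : (PySem.List.sorted d.items (fun kv => kv.1) false).map Prod.fst |>.Perm d.keys :=
    (PySem.List.sorted_perm d.items (fun kv => kv.1) false).map Prod.fst
  have hnodup : ((PySem.List.sorted d.items (fun kv => kv.1) false).map Prod.fst).Nodup :=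
    hperm.nodup_iff.mpr hnd
  have hne : (PySem.List.sorted d.items (fun kv => kv.1) false).Pairwise (fun p q => p.1 ≠ q.1) :=
    List.pairwise_map.mp hnodup
  exact (hle.and hne).imp (fun h => lt_of_le_of_ne h.1 h.2)

-- a key-strictly-sorted list has distinct keys
theorem nodup_map_fst_of_pairwise (l : List (String × Int))
    (h : l.Pairwise (fun p q => p.1 < q.1)) : (l.map Prod.fst).Nodup :=
  List.pairwise_map.mpr (h.imp (fun hlt => ne_of_lt hlt))

-- dict(out) over a list with distinct keys is that list again
theorem items_ofList_of_nodup (l : List (String × Int)) (h : (l.map Prod.fst).Nodup) :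
    (PySem.Dict.ofList l).items = l := by
  have := PySem.Dict.items_foldl_insert_fresh l Prod.fst Prod.snd PySem.Dict.empty
    (fun a _ => PySem.Dict.contains_empty a.1) h
  simpa [PySem.Dict.ofList, PySem.Dict.update] using this

-- membership characterisation of A's output list
theorem mem_A_iff (m : PySem.Dict String Int) (p : String × Int) :
    p ∈ (PySem.List.sorted m.keys (fun k => k) false).map (fun k => (k, m.getD k 0)) ↔
      m.get? p.1 = some p.2 := by
  rw [List.mem_map]
  constructor
  · rintro ⟨k, hk, rfl⟩
    have hk' : k ∈ m.keys := (PySem.List.sorted_perm m.keys (fun k => k) false).mem_iff.mp hk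
    have : m.get? k ≠ none := fun h => (PySem.Dict.get?_eq_none_iff_not_mem_keys m k).mp h hk'
    rcases Option.ne_none_iff_exists'.mp this with ⟨v, hv⟩
    simp [PySem.Dict.getD_eq_get?_getD, hv]
  · intro h
    refine ⟨p.1, ?_, ?_⟩
    · refine (PySem.List.sorted_perm m.keys (fun k => k) false).mem_iff.mpr ?_
      by_contra hnot
      rw [(PySem.Dict.get?_eq_none_iff_not_mem_keys m p.1).mpr hnot] at h
      exact Option.some_ne_none p.2 h.symm
    · simp [PySem.Dict.getD_eq_get?_getD, h]

-- A's merged dict is always (ofList L).update R for the None-normalised inputs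
theorem merged_eq (left right : Option (List (String × Int))) :
    (match left with
     | none => PySem.Dict.ofList (right.getD [])
     | some l =>
       match right with
       | none => PySem.Dict.ofList l
       | some r => (PySem.Dict.ofList l).update r) =
    (PySem.Dict.ofList (left.getD [])).update (right.getD []) := by
  cases left <;> cases right <;> rfl

-- ===== VERDICT (by name: the statement is the Claim_ definition above) =====
theorem merge_typed_dicts_spec : Claim_equal_merge_typed_dicts := by
  intro left right _
  unfold Spec_merge_typed_dicts merge_typed_dicts merge_typed_dicts_alt
  rw [merged_eq]
  set L := left.getD [] with hL
  set R := right.getD [] with hR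
  set dl := PySem.Dict.ofList L with hdl
  set dr := PySem.Dict.ofList R with hdr
  set m := dl.update R with hm
  set sa := PySem.List.sorted dl.items (fun kv => kv.1) false with hsa
  set sb := PySem.List.sorted dr.items (fun kv => kv.1) false with hsb
  set M := pvMergeLoop sa sb with hM
  have hndl : dl.keys.Nodup := nodup_keys_ofList' L
  have hndr : dr.keys.Nodup := nodup_keys_ofList' R
  have hndm : m.keys.Nodup := PySem.Dict.nodup_keys_update _ _ hndl
  have hsaP : sa.Pairwise (fun p q => p.1 < q.1) := sorted_items_pairwise dl hndl
  have hsbP : sb.Pairwise (fun p q => p.1 < q.1) := sorted_items_pairwise dr hndr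
  have hMP : M.Pairwise (fun p q => p.1 < q.1) := pvMergeLoop_pairwise sa sb hsaP hsbP
  -- B's final dict(...) returns M itself
  have hB : (PySem.Dict.ofList M).items = M :=
    items_ofList_of_nodup M (nodup_map_fst_of_pairwise M hMP)
  rw [hB]
  -- both sides are key-strictly-sorted; show they are permutations by comparing membership
  have hmemM : ∀ p : String × Int, p ∈ M ↔ m.get? p.1 = some p.2 := by
    intro p
    rw [hM, pvMergeLoop_mem sa sb hsaP hsbP p]
    have hmsa : p ∈ sa ↔ dl.get? p.1 = some p.2 := by
      rw [(PySem.List.sorted_perm dl.items (fun kv => kv.1) false).mem_iff,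
        ← PySem.Dict.get?_eq_some_iff_mem_items dl p.1 p.2 hndl]
    have hmsb : p ∈ sb ↔ dr.get? p.1 = some p.2 := by
      rw [(PySem.List.sorted_perm dr.items (fun kv => kv.1) false).mem_iff,
        ← PySem.Dict.get?_eq_some_iff_mem_items dr p.1 p.2 hndr]
    have hkeys : p.1 ∈ sb.map Prod.fst ↔ p.1 ∈ dr.keys := by
      exact ((PySem.List.sorted_perm dr.items (fun kv => kv.1) false).map Prod.fst).mem_iff
    rw [hmsa, hmsb, hkeys, hm, get?_update_split dl R p.1, ← hdr]
    cases hg : dr.get? p.1 with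
    | some v =>
      have hkmem : p.1 ∈ dr.keys := by
        by_contra hnot
        rw [(PySem.Dict.get?_eq_none_iff_not_mem_keys dr p.1).mpr hnot] at hg
        exact Option.some_ne_none v hg.symm
      constructor
      · rintro (h | ⟨_, hnk⟩)
        · exact h ▸ rfl
        · exact absurd hkmem hnk
      · intro h
        exact Or.inl h
    | none =>
      have hnk : p.1 ∉ dr.keys := (PySem.Dict.get?_eq_none_iff_not_mem_keys dr p.1).mp hg
      constructor
      · rintro (h | ⟨h, _⟩)
        · exact absurd h (by simp)
        · exact h
      · intro h
        exact Or.inr ⟨h, hnk⟩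
  have hmemA : ∀ p : String × Int,
      p ∈ (PySem.List.sorted m.keys (fun k => k) false).map (fun k => (k, m.getD k 0)) ↔
        m.get? p.1 = some p.2 := mem_A_iff m
  have hAP : ((PySem.List.sorted m.keys (fun k => k) false).map (fun k => (k, m.getD k 0))).Pairwise
      (fun p q => p.1 < q.1) := by
    have hle := PySem.List.sorted_pairwise m.keys (fun k => k)
    have hnodup : (PySem.List.sorted m.keys (fun k => k) false).Nodup :=
      (PySem.List.sorted_perm m.keys (fun k => k) false).nodup_iff.mpr hndm
    have hlt : (PySem.List.sorted m.keys (fun k => k) false).Pairwise (· < ·) :=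
      (hle.and hnodup).imp (fun h => lt_of_le_of_ne h.1 h.2)
    exact List.pairwise_map.mpr (hlt.imp (fun h => h))
  have hperm : ((PySem.List.sorted m.keys (fun k => k) false).map (fun k => (k, m.getD k 0))).Perm M := by
    rw [List.perm_ext_iff_of_nodup
      (hAP.imp (fun h => fun he => absurd (he ▸ h) (lt_irrefl _)))
      (hMP.imp (fun h => fun he => absurd (he ▸ h) (lt_irrefl _)))]
    intro p
    rw [hmemA p, hmemM p]
  -- two key-strictly-sorted permutations of each other are equal
  calc (PySem.List.sorted m.keys (fun k => k) false).map (fun k => (k, m.getD k 0))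
      = PySem.List.sorted ((PySem.List.sorted m.keys (fun k => k) false).map (fun k => (k, m.getD k 0))) (fun kv => kv.1) false := by
        rw [PySem.List.sorted_eq_self_of_pairwise _ _ (hAP.imp le_of_lt)]
    _ = M := PySem.List.sorted_eq_of_perm_of_pairwise_lt _ _ _ hperm.symm hMP
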